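-- pv_equiv track=rewrite | github.com/jennastanislaw/cassettecrafter | src/split_sites_utils.py | calculate_oligo_lengths
-- ===== SOURCE A (Python) =====
-- def calculate_oligo_lengths(reference, split_indices, OH_len):
--     """
--     Calculate the lengths of oligos based on the split indices in the reference sequence.
--
--     Args:
--         reference (str): The reference DNA sequence.
--         split_indices (list): List of indices where the reference sequence is split.
--         OH_len (int): The length of the overhang to add to each oligo.
--
--     Returns:
--         list: A list of oligo lengths, including overhang length, based on the split indices.
--
--     Raises:
--         ValueError: If any split index is out of the range of the reference sequence length.
--     """
--     if any(index < 0 or index > len(reference) for index in split_indices):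
--         raise ValueError("One or more split indices are out of the range of the reference sequence length.")
--
--     oligo_lengths = []
--
--     if not split_indices:
--         # If no splits, return the full length of the reference sequence
--         oligo_lengths.append(len(reference))
--     else:
--         # Calculate oligo lengths with overhangs
--         oligo_lengths.append(split_indices[0] + OH_len)  # From start to first split index
--         oligo_lengths.extend(split_indices[i + 1] - split_indices[i] + OH_len for i in range(len(split_indices) - 1))
--         oligo_lengths.append(len(reference) - split_indices[-1])  # From last split index to end
--
--     return oligo_lengths
-- ===== SOURCE B (Python) =====
-- def calculate_oligo_lengths(reference, split_indices, OH_len):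
--     """Recursive reimplementation: walk the split list carrying the previous
--     boundary; each step emits (first split - previous boundary + OH_len), the
--     base case emits the final overhang-free segment len(reference) - prev."""
--     if any(index < 0 or index > len(reference) for index in split_indices):
--         raise ValueError("One or more split indices are out of the range of the reference sequence length.")
--
--     def segments(prev, idxs):
--         if not idxs:
--             return [len(reference) - prev]
--         first, rest = idxs[0], idxs[1:]
--         return [first - prev + OH_len] + segments(first, rest)
--
--     return segments(0, list(split_indices))
-- ===== Notes on version B (the rewrite author's own statement) =====
-- stated objective: alternative
-- what changed: Replaces A's staged list construction (special empty case, explicit first segment, index-based middle generator over range(len-1), explicit last segment) with a structural recursion over the split list carrying the previous boundary, whose base case yields the final overhang-free segment and subsumes the empty case.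
import Mathlib
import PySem

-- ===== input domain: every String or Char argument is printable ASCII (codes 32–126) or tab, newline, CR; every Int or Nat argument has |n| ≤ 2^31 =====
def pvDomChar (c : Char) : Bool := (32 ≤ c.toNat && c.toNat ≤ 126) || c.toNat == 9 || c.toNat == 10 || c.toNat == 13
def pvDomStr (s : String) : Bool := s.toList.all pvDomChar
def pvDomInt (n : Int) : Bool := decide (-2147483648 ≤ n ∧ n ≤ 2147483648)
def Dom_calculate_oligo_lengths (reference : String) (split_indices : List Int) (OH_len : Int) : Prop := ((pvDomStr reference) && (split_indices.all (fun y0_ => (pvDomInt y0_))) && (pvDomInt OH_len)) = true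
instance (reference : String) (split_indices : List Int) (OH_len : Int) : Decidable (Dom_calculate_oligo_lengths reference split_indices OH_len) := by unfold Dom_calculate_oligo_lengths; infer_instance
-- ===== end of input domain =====

-- B replaces A's staged list construction with a structural recursion over the split list
-- carrying the previous boundary; same validation, same exact values (objective: alternative).


-- ===== PORT A =====
-- Literal port of A's non-raising path: the guard's raise is excluded by Pre_ below.
-- split_indices[0] → headD, split_indices[-1] → getLastD, range(len-1) → List.range;
-- indices i, i+1 are in range, so getD with default 0 is exact.
def calculate_oligo_lengths (reference : String) (split_indices : List Int) (OH_len : Int) : List Int :=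
  let n : Int := PySem.Str.len reference
  if split_indices.isEmpty then [n]
  else
    [split_indices.headD 0 + OH_len]
      ++ (List.range (split_indices.length - 1)).map
          (fun i => split_indices.getD (i + 1) 0 - split_indices.getD i 0 + OH_len)
      ++ [n - split_indices.getLastD 0]

-- ===== PORT B =====
-- Port of Source B's inner recursive helper `segments(prev, idxs)`.
def pvSegments (refLen OH : Int) : Int → List Int → List Int
  | prev, [] => [refLen - prev]
  | prev, first :: rest => (first - prev + OH) :: pvSegments refLen OH first rest

def calculate_oligo_lengths_alt (reference : String) (split_indices : List Int) (OH_len : Int) : List Int :=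
  pvSegments (PySem.Str.len reference) OH_len 0 split_indices

-- ===== PRECONDITION & SPEC =====
-- Pre_ excludes exactly the inputs on which A raises ValueError (some split index < 0 or > len(reference)).
def Pre_calculate_oligo_lengths (reference : String) (split_indices : List Int) (OH_len : Int) : Prop :=
  (split_indices.all (fun i => decide (0 ≤ i) && decide (i ≤ PySem.Str.len reference))) = true
instance (reference : String) (split_indices : List Int) (OH_len : Int) : Decidable (Pre_calculate_oligo_lengths reference split_indices OH_len) := by unfold Pre_calculate_oligo_lengths; infer_instance
def pvWitness_calculate_oligo_lengths : String × List Int × Int := ("ACGTAC", [2, 4], 3)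

def Spec_calculate_oligo_lengths (reference : String) (split_indices : List Int) (OH_len : Int) (out : List Int) : Prop := out = calculate_oligo_lengths_alt reference split_indices OH_len
instance (reference : String) (split_indices : List Int) (OH_len : Int) (out : List Int) : Decidable (Spec_calculate_oligo_lengths reference split_indices OH_len out) := by unfold Spec_calculate_oligo_lengths; infer_instance

-- ===== CLAIM (what is proved, stated in full; the proofs are below) =====
def Claim_equal_calculate_oligo_lengths : Prop := ∀ (reference : String) (split_indices : List Int) (OH_len : Int), Dom_calculate_oligo_lengths reference split_indices OH_len → Pre_calculate_oligo_lengths reference split_indices OH_len → Spec_calculate_oligo_lengths reference split_indices OH_len (calculate_oligo_lengths reference split_indices OH_len)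

-- ===== LEMMAS AND PROOFS =====

-- A's tail (middle generator ++ last element) equals B's recursion from the first split.
lemma pvA_tail (OH n : Int) : ∀ (a : Int) (t : List Int),
    (List.range ((a :: t).length - 1)).map
        (fun i => (a :: t).getD (i + 1) 0 - (a :: t).getD i 0 + OH)
      ++ [n - (a :: t).getLastD 0] = pvSegments n OH a t := by
  intro a t
  induction t generalizing a with
  | nil => simp [pvSegments]
  | cons x xs ih =>
    have h := ih x
    simp only [List.length_cons, Nat.add_sub_cancel] at h ⊢
    rw [List.range_succ_eq_map]
    simp only [List.map_cons, List.map_map, List.cons_append]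
    have hmap : List.map
          ((fun i => (a :: x :: xs).getD (i + 1) 0 - (a :: x :: xs).getD i 0 + OH) ∘ Nat.succ)
          (List.range xs.length)
        = List.map (fun i => (x :: xs).getD (i + 1) 0 - (x :: xs).getD i 0 + OH)
            (List.range xs.length) :=
      List.map_congr_left (fun i _ => by simp [Function.comp])
    have hlast : (a :: x :: xs).getLastD 0 = (x :: xs).getLastD 0 := by
      simp
    rw [hmap, hlast, h]
    simp [pvSegments]

-- ===== VERDICT (by name: the statement is the Claim_ definition above) =====
theorem calculate_oligo_lengths_spec : Claim_equal_calculate_oligo_lengths := by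
  intro reference split_indices OH_len _ _
  unfold Spec_calculate_oligo_lengths calculate_oligo_lengths calculate_oligo_lengths_alt
  cases split_indices with
  | nil => simp [pvSegments]
  | cons a t =>
    simp only [List.isEmpty_cons, Bool.false_eq_true, if_false]
    rw [pvSegments]
    simp only [sub_zero, List.headD_cons, List.cons_append, List.nil_append]
    exact congrArg _ (pvA_tail OH_len (PySem.Str.len reference) a t)
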